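-- pv_equiv track=rewrite | github.com/suetaketakaya/SoftwareQualitySimposium | scripts/generate_visualizations.py | generate_heatmap
-- ===== SOURCE A (Python) =====
-- from collections import Counter, defaultdict
--
-- SEVERITY_EMOJI = {"high": "🔴", "medium": "🟡", "low": "🟢"}
--
-- def generate_heatmap(target: dict) -> str:
--     """state_variables × encapsulation_risks の交差ヒートマップ。
--
--     OOP 対象では state × risk の観点で複合影響が最も顕在化するため、
--     このペアをデフォルトのヒートマップ軸として採用する。
--     """
--     svars = target.get("state_variables") or []
--     risks = target.get("encapsulation_risks") or []
--     if not svars or not risks: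
--         return "> (state_variables または encapsulation_risks が空のためヒートマップ対象外)"
--
--     risk_by_field: dict[str, list[dict]] = defaultdict(list)
--     for r in risks:
--         risk_by_field[r.get("field_name", "")].append(r)
--
--     cols = ["missing_validation", "leaky_getter", "leaky_setter",
--             "unintended_mutability", "external_mutation", "invariant_breach",
--             "public_mutable_field"]
--
--     lines = ["| field | " + " | ".join(cols) + " |"]
--     lines.append("|---|" + "|".join("---" for _ in cols) + "|")
--
--     for sv in svars:
--         fname = sv.get("name", "")
--         row = [fname]
--         matched = risk_by_field.get(fname, [])
--         for col in cols:
--             severity = ""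
--             for r in matched:
--                 if r.get("risk_type") == col:
--                     severity = SEVERITY_EMOJI.get(r.get("severity", "low"), "")
--                     break
--             row.append(severity or "—")
--         lines.append("| " + " | ".join(row) + " |")
--
--     lines.append("")
--     lines.append("**凡例**: 🔴 high / 🟡 medium / 🟢 low / — 検出なし")
--     return "\n".join(lines)
-- ===== SOURCE B (Python) =====
-- SEVERITY_EMOJI = {"high": "🔴", "medium": "🟡", "low": "🟢"}
--
-- COLS = ["missing_validation", "leaky_getter", "leaky_setter",
--         "unintended_mutability", "external_mutation", "invariant_breach",
--         "public_mutable_field"]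
--
--
-- def generate_heatmap(target: dict) -> str:
--     svars = target.get("state_variables") or []
--     risks = target.get("encapsulation_risks") or []
--     if not svars or not risks:
--         return "> (state_variables または encapsulation_risks が空のためヒートマップ対象外)"
--
--     # Grid built back-to-front: every cell starts at '—'; walking risks in
--     # REVERSE order and overwriting means the chronologically FIRST risk per
--     # (field, column) ends up in the cell. No grouping, no first-match search.
--     colpos = {c: i for i, c in enumerate(COLS)}
--     cells = {sv.get("name", ""): ["—"] * len(COLS) for sv in svars}
--     for r in reversed(risks):
--         f = r.get("field_name", "")
--         rt = r.get("risk_type")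
--         if f in cells and rt in colpos:
--             cells[f][colpos[rt]] = SEVERITY_EMOJI.get(r.get("severity", "low"), "") or "—"
--
--     out = ["| field | " + " | ".join(COLS) + " |",
--            "|---|" + "|".join(["---"] * len(COLS)) + "|"]
--     for sv in svars:
--         fname = sv.get("name", "")
--         out.append("| " + " | ".join([fname] + cells[fname]) + " |")
--     out.append("")
--     out.append("**凡例**: 🔴 high / 🟡 medium / 🟢 low / — 検出なし")
--     return "\n".join(out)
-- ===== Notes on version B (the rewrite author's own statement) =====
-- stated objective: alternative
-- what changed: Instead of grouping risks per field and doing a break-on-first scan for every (row, column) cell, B prefills a grid of '—' cells keyed by variable name and makes one pass over risks in REVERSE order, overwriting cells so the chronologically first risk per (field, column) wins; rows are then read off the grid.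
import Mathlib
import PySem

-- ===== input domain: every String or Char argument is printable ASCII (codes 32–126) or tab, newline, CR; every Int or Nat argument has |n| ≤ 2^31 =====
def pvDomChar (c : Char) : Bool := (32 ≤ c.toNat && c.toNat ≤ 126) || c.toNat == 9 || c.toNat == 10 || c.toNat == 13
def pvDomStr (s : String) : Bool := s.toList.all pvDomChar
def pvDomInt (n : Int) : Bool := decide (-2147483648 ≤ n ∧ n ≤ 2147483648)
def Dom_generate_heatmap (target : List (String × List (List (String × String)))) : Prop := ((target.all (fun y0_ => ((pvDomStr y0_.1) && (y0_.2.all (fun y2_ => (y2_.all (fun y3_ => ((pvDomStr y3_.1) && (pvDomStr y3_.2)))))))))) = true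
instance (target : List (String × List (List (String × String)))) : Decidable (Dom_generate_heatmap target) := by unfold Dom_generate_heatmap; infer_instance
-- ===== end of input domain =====

-- B builds the grid back-to-front: every cell starts at '—' and one REVERSE pass over risks
-- overwrites cells, so the chronologically first risk per (field, column) wins — no grouping,
-- no first-match search (objective: simpler).

-- shared module constants / Python r.get(k, d) on a dict literal
def sevEmoji : PySem.Dict String String :=
  PySem.Dict.ofList [("high", "🔴"), ("medium", "🟡"), ("low", "🟢")]

def heatCols : List String :=
  ["missing_validation", "leaky_getter", "leaky_setter",
   "unintended_mutability", "external_mutation", "invariant_breach",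
   "public_mutable_field"]

def heatLegend : String := "**凡例**: 🔴 high / 🟡 medium / 🟢 low / — 検出なし"

def heatEmptyMsg : String := "> (state_variables または encapsulation_risks が空のためヒートマップ対象外)"

def rget (r : List (String × String)) (k d : String) : String :=
  (PySem.Dict.mk r).getD k d

-- ===== PORT A =====
-- inner 'for r in matched: if …: severity = …; break' loop (severity starts "")
def firstSeverity (matched : List (List (String × String))) (col : String) : String :=
  match matched with
  | [] => ""
  | r :: rest =>
    if (PySem.Dict.mk r).get? "risk_type" == some col then
      sevEmoji.getD (rget r "severity" "low") ""
    else firstSeverity rest col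

def generate_heatmap (target : List (String × List (List (String × String)))) : String :=
  let svars := ((PySem.Dict.mk target).get? "state_variables").getD []
  let risks := ((PySem.Dict.mk target).get? "encapsulation_risks").getD []
  if svars.isEmpty || risks.isEmpty then heatEmptyMsg
  else
    let risk_by_field : PySem.Dict String (List (List (String × String))) :=
      risks.foldl (fun d r => d.modify (rget r "field_name" "") [] (· ++ [r])) PySem.Dict.empty
    let lines := ["| field | " ++ PySem.Str.join " | " heatCols ++ " |"]
    let lines := lines ++ ["|---|" ++ PySem.Str.join "|" (heatCols.map (fun _ => "---")) ++ "|"]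
    let lines := svars.foldl (fun lines sv =>
      let fname := rget sv "name" ""
      let matched := risk_by_field.getD fname []
      let row := [fname] ++ heatCols.map (fun col =>
        let severity := firstSeverity matched col
        if severity == "" then "—" else severity)
      lines ++ ["| " ++ PySem.Str.join " | " row ++ " |"]) lines
    let lines := lines ++ ["", heatLegend]
    PySem.Str.join "\n" lines

-- ===== PORT B =====
-- colpos = {c: i for i, c in enumerate(COLS)}   (Python ints are Int)
def colposB : PySem.Dict String Int :=
  (PySem.List.enumerate heatCols).foldl (fun d p => d.insert p.2 p.1) PySem.Dict.empty

-- SEVERITY_EMOJI.get(r.get("severity", "low"), "") or "—"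
def renderB (r : List (String × String)) : String :=
  if sevEmoji.getD (rget r "severity" "low") "" == "" then "—"
  else sevEmoji.getD (rget r "severity" "low") ""

-- the body of B's 'for r in reversed(risks)' loop; cells[f][colpos[rt]] = emoji or '—'
-- (colpos values come from enumerate, hence ≥ 0, so .toNat is exact here)
def heatStep (g : PySem.Dict String (List String)) (r : List (String × String)) :
    PySem.Dict String (List String) :=
  if g.contains (rget r "field_name" "") &&
      (match (PySem.Dict.mk r).get? "risk_type" with
       | some s => colposB.contains s | none => false) then
    g.modify (rget r "field_name" "") [] (fun row =>
      row.set (match (PySem.Dict.mk r).get? "risk_type" with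
               | some s => (colposB.getD s 0).toNat | none => 0) (renderB r))
  else g

def generate_heatmap_alt (target : List (String × List (List (String × String)))) : String :=
  let svars := ((PySem.Dict.mk target).get? "state_variables").getD []
  let risks := ((PySem.Dict.mk target).get? "encapsulation_risks").getD []
  if svars.isEmpty || risks.isEmpty then heatEmptyMsg
  else
    -- cells = {sv.get("name",""): ["—"]*len(COLS) for sv in svars}
    let cells0 : PySem.Dict String (List String) :=
      svars.foldl (fun d sv => d.insert (rget sv "name" "") (List.replicate heatCols.length "—"))
        PySem.Dict.empty
    let cells := risks.reverse.foldl heatStep cells0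
    let out := ["| field | " ++ PySem.Str.join " | " heatCols ++ " |",
                "|---|" ++ PySem.Str.join "|" (List.replicate heatCols.length "---") ++ "|"]
    let out := svars.foldl (fun out sv =>
      let fname := rget sv "name" ""
      -- cells[fname]: fname is always a key (the dict was built from svars), so getD is exact
      out ++ ["| " ++ PySem.Str.join " | " ([fname] ++ cells.getD fname []) ++ " |"]) out
    let out := out ++ ["", heatLegend]
    PySem.Str.join "\n" out

-- ===== PRECONDITION & SPEC =====
def Spec_generate_heatmap (target : List (String × List (List (String × String)))) (out : String) : Prop := out = generate_heatmap_alt target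
instance (target : List (String × List (List (String × String)))) (out : String) : Decidable (Spec_generate_heatmap target out) := by unfold Spec_generate_heatmap; infer_instance

-- ===== CLAIM (what is proved, stated in full; the proofs are below) =====
def Claim_equal_generate_heatmap : Prop := ∀ (target : List (String × List (List (String × String)))), Dom_generate_heatmap target → Spec_generate_heatmap target (generate_heatmap target)

-- ===== LEMMAS AND PROOFS =====

-- A's grouping: the risks matched for fname are exactly the risks whose field_name is fname, in order
theorem matched_eq_filter (risks : List (List (String × String))) (fname : String) :
    (risks.foldl (fun d r => d.modify (rget r "field_name" "") [] (· ++ [r]))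
        PySem.Dict.empty).getD fname []
      = risks.filter (fun r => rget r "field_name" "" == fname) := by
  have h := PySem.Dict.getD_foldl_modify_append
      (l := risks.map (fun r => (rget r "field_name" "", r))) (d := PySem.Dict.empty)
      (c := fname)
  rw [List.foldl_map] at h
  simpa [List.filter_map, Function.comp_def] using h

-- A's cell for (fname, col), phrased on the unfiltered risk list
def cellA (risks : List (List (String × String))) (fname col : String) : String :=
  let s := firstSeverity (risks.filter (fun r => rget r "field_name" "" == fname)) col
  if s == "" then "—" else s

-- B's loop, read front-first: the first risk hitting (fname, column i) determines the cell
def firstWrite (risks : List (List (String × String))) (fname : String) (i : Nat) : Option String :=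
  match risks with
  | [] => none
  | r :: rest =>
    if rget r "field_name" "" = fname ∧
        ((PySem.Dict.mk r).get? "risk_type").bind colposB.get? = some (i : Int) then
      some (renderB r)
    else firstWrite rest fname i

-- cells0: lookup in the dict-comprehension grid
theorem getD_cells0 (svars : List (List (String × String))) (d : PySem.Dict String (List String))
    (c : String) (v dflt : List String) :
    (svars.foldl (fun d sv => d.insert (rget sv "name" "") v) d).getD c dflt
      = if c ∈ svars.map (fun sv => rget sv "name" "") then v else d.getD c dflt := by
  induction svars generalizing d with
  | nil => simp
  | cons sv rest ih =>
    rw [List.foldl_cons, ih]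
    by_cases h : c ∈ rest.map (fun sv => rget sv "name" "")
    · simp [h]
    · by_cases he : c = rget sv "name" "" <;>
        simp [h, he, PySem.Dict.getD_insert]

theorem contains_cells0 (svars : List (List (String × String)))
    (d : PySem.Dict String (List String)) (c : String) (v : List String) :
    (svars.foldl (fun d sv => d.insert (rget sv "name" "") v) d).contains c
      = ((c ∈ svars.map (fun sv => rget sv "name" "")) || d.contains c) := by
  induction svars generalizing d with
  | nil => simp
  | cons sv rest ih =>
    rw [List.foldl_cons, ih]
    by_cases he : c = rget sv "name" ""
    · simp [he]
    · have hb : (c == rget sv "name" "") = false := beq_eq_false_iff_ne.mpr he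
      simp [he, PySem.Dict.contains_insert, hb]

theorem step_contains (g : PySem.Dict String (List String)) (r : List (String × String))
    (c : String) : (heatStep g r).contains c = g.contains c := by
  unfold heatStep
  split_ifs with h
  · rw [PySem.Dict.contains_modify]
    by_cases he : c = rget r "field_name" ""
    · subst he
      simp only [Bool.and_eq_true] at h
      simp [h.1]
    · simp [he]
  · rfl

theorem fold_contains (risks : List (List (String × String)))
    (g : PySem.Dict String (List String)) (c : String) :
    (risks.foldr (fun r g => heatStep g r) g).contains c = g.contains c := by
  induction risks with
  | nil => rfl
  | cons r rest ih => rw [List.foldr_cons, step_contains, ih]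

-- every column index is < 7, and colpos inverts heatCols
theorem colposB_get?_lt (s : String) (i : Int) (h : colposB.get? s = some i) :
    0 ≤ i ∧ i.toNat < 7 := by
  have : colposB = PySem.Dict.mk [("missing_validation", (0 : Int)), ("leaky_getter", 1),
      ("leaky_setter", 2), ("unintended_mutability", 3), ("external_mutation", 4),
      ("invariant_breach", 5), ("public_mutable_field", 6)] := by decide
  rw [this] at h
  simp only [PySem.Dict.get?_mk_cons] at h
  split_ifs at h <;> first
    | exact Option.noConfusion h
    | (injection h with h'; omega)
    | (simp [PySem.Dict.get?] at h)

theorem colposB_get?_iff (s : String) (i : Nat) :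
    colposB.get? s = some (i : Int) ↔ heatCols[i]? = some s := by
  have hc : colposB = PySem.Dict.mk [("missing_validation", (0 : Int)), ("leaky_getter", 1),
      ("leaky_setter", 2), ("unintended_mutability", 3), ("external_mutation", 4),
      ("invariant_breach", 5), ("public_mutable_field", 6)] := by decide
  constructor
  · intro h
    have hb := colposB_get?_lt _ _ h
    have hi : i < 7 := by omega
    rw [hc] at h
    interval_cases i <;>
      · simp only [PySem.Dict.get?_mk_cons] at h
        split_ifs at h <;> simp_all [heatCols, PySem.Dict.get?]
  · intro h
    have hlt : i < heatCols.length := by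
      by_contra hge
      rw [List.getElem?_eq_none (by omega)] at h
      simp at h
    have hlt7 : i < 7 := by simpa [heatCols] using hlt
    interval_cases i <;>
      · simp only [heatCols, List.getElem?_cons_zero, List.getElem?_cons_succ] at h
        injection h with h
        subst h
        decide

-- length preservation (needed to turn pointwise agreement into list equality)
theorem fold_len (risks : List (List (String × String)))
    (g : PySem.Dict String (List String)) (fname : String)
    (hl : (g.getD fname []).length = 7) :
    ((risks.foldr (fun r g => heatStep g r) g).getD fname []).length = 7 := by
  induction risks with
  | nil => exact hl
  | cons r rest ih =>
    rw [List.foldr_cons, heatStep]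
    split_ifs with h
    · rw [PySem.Dict.getD_modify]
      split_ifs with he
      · rw [← he, List.length_set]; exact ih
      · exact ih
    · exact ih

-- the cell lemma: the grid after the reverse loop, read at (fname, i)
theorem fold_cell (risks : List (List (String × String)))
    (g : PySem.Dict String (List String)) (fname : String) (i : Nat)
    (hc : g.contains fname = true) (hl : (g.getD fname []).length = 7) :
    ((risks.foldr (fun r g => heatStep g r) g).getD fname [])[i]?
      = match firstWrite risks fname i with
        | some v => some v
        | none => (g.getD fname [])[i]? := by
  induction risks with
  | nil => rfl
  | cons r rest ih =>
    rw [List.foldr_cons]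
    have hc' : (rest.foldr (fun r g => heatStep g r) g).contains fname = true := by
      rw [fold_contains]; exact hc
    have hl' : ((rest.foldr (fun r g => heatStep g r) g).getD fname []).length = 7 :=
      fold_len rest g fname hl
    rw [heatStep]
    by_cases hcond : ((rest.foldr (fun r g => heatStep g r) g).contains (rget r "field_name" "") &&
        (match (PySem.Dict.mk r).get? "risk_type" with
         | some s => colposB.contains s | none => false)) = true
    · rw [if_pos hcond]
      obtain ⟨hcf, hrt⟩ := Bool.and_eq_true_iff.mp hcond
      cases hrta : (PySem.Dict.mk r).get? "risk_type" with
      | none => rw [hrta] at hrt; simp at hrt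
      | some sr =>
        rw [hrta] at hrt
        have hrt' : colposB.contains sr = true := hrt
        have hget : ∃ j, colposB.get? sr = some j := by
          cases hj : colposB.get? sr with
          | none => rw [PySem.Dict.contains_eq_isSome_get?, hj] at hrt'; simp at hrt'
          | some j => exact ⟨j, rfl⟩
        obtain ⟨j, hj⟩ := hget
        have hjlt := colposB_get?_lt _ _ hj
        have hgetD : colposB.getD sr 0 = j := by
          rw [PySem.Dict.getD_eq_get?_getD, hj]; rfl
        rw [PySem.Dict.getD_modify]
        by_cases hf : fname = rget r "field_name" ""
        · rw [if_pos hf, ← hf]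
          have hidx : (match some sr with
              | some s => (colposB.getD s 0).toNat | none => 0) = j.toNat := by
            show (colposB.getD sr 0).toNat = j.toNat
            rw [hgetD]
          rw [hidx, List.getElem?_set, hl']
          have hfw : firstWrite (r :: rest) fname i
              = if j.toNat = i then some (renderB r) else firstWrite rest fname i := by
            simp only [firstWrite]
            by_cases hji : j.toNat = i
            · rw [if_pos hji, if_pos ⟨hf.symm, by rw [hrta]; simp only [Option.bind, hj, Option.some.injEq]; omega⟩]
            · rw [if_neg hji, if_neg]
              rintro ⟨_, habs⟩
              rw [hrta] at habs
              simp only [Option.bind, hj, Option.some.injEq] at habs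
              omega
          rw [hfw]
          by_cases hji : j.toNat = i
          · rw [if_pos hji, if_pos (show j.toNat < 7 by omega), if_pos hji]
          · rw [if_neg hji, if_neg hji]
            exact ih
        · rw [if_neg hf]
          have hfw : firstWrite (r :: rest) fname i = firstWrite rest fname i := by
            simp only [firstWrite]
            rw [if_neg]
            rintro ⟨h1, _⟩
            exact hf h1.symm
          rw [hfw]
          exact ih
    · rw [if_neg hcond]
      have hfw : firstWrite (r :: rest) fname i = firstWrite rest fname i := by
        simp only [firstWrite]
        rw [if_neg]
        rintro ⟨h1, h2⟩
        apply hcond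
        refine Bool.and_eq_true_iff.mpr ⟨by rw [h1]; exact hc', ?_⟩
        cases hrta : (PySem.Dict.mk r).get? "risk_type" with
        | none => rw [hrta] at h2; simp at h2
        | some sr =>
          rw [hrta] at h2
          have h2' : colposB.get? sr = some (i : Int) := h2
          show colposB.contains sr = true
          rw [PySem.Dict.contains_eq_isSome_get?, h2']
          rfl
      rw [hfw]
      exact ih

-- no column has index ≥ 7, so high indices are never written
theorem firstWrite_none_of_ge (risks : List (List (String × String))) (fname : String)
    (i : Nat) (hi : 7 ≤ i) : firstWrite risks fname i = none := by
  induction risks with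
  | nil => rfl
  | cons r rest ih =>
    simp only [firstWrite]
    rw [if_neg, ih]
    rintro ⟨_, habs⟩
    cases hrta : (PySem.Dict.mk r).get? "risk_type" with
    | none => rw [hrta] at habs; simp at habs
    | some sr =>
      rw [hrta] at habs
      simp only [Option.bind] at habs
      have := colposB_get?_lt _ _ habs
      omega

-- A's first-match cell = B's first-write cell, per column index
theorem cell_corr (risks : List (List (String × String))) (fname col : String) (i : Nat)
    (hcol : heatCols[i]? = some col) :
    (match firstWrite risks fname i with | some v => v | none => "—")
      = cellA risks fname col := by
  induction risks with
  | nil => simp [firstWrite, cellA, firstSeverity]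
  | cons r rest ih =>
    have hiff : (((PySem.Dict.mk r).get? "risk_type").bind colposB.get? = some (i : Int))
        ↔ (PySem.Dict.mk r).get? "risk_type" = some col := by
      cases hrta : (PySem.Dict.mk r).get? "risk_type" with
      | none => simp
      | some sr =>
        simp only [Option.bind]
        rw [colposB_get?_iff sr i, hcol]
        constructor
        · intro h'; injection h' with h'; rw [h']
        · intro h'; injection h' with h'; rw [h']
    have hBfw : firstWrite (r :: rest) fname i
        = if rget r "field_name" "" = fname ∧ (PySem.Dict.mk r).get? "risk_type" = some col
          then some (renderB r) else firstWrite rest fname i := by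
      simp only [firstWrite]
      by_cases hcase : rget r "field_name" "" = fname ∧
          (PySem.Dict.mk r).get? "risk_type" = some col
      · rw [if_pos ⟨hcase.1, hiff.mpr hcase.2⟩, if_pos hcase]
      · rw [if_neg (fun h' => hcase ⟨h'.1, hiff.mp h'.2⟩), if_neg hcase]
    have hAfs : firstSeverity ((r :: rest).filter (fun r' => rget r' "field_name" "" == fname)) col
        = if rget r "field_name" "" = fname ∧ (PySem.Dict.mk r).get? "risk_type" = some col
          then sevEmoji.getD (rget r "severity" "low") ""
          else firstSeverity (rest.filter (fun r' => rget r' "field_name" "" == fname)) col := by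
      by_cases hf : rget r "field_name" "" = fname
      · rw [List.filter_cons_of_pos (by simp [hf])]
        by_cases hrt : (PySem.Dict.mk r).get? "risk_type" = some col
        · rw [if_pos ⟨hf, hrt⟩]
          simp [firstSeverity, hrt]
        · rw [if_neg (fun h' => hrt h'.2)]
          simp only [firstSeverity]
          rw [if_neg (by simp [hrt])]
      · rw [List.filter_cons_of_neg (by simp [hf]), if_neg (fun h' => hf h'.1)]
    by_cases hcase : rget r "field_name" "" = fname ∧
        (PySem.Dict.mk r).get? "risk_type" = some col
    · rw [hBfw, if_pos hcase]
      unfold cellA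
      rw [hAfs, if_pos hcase]
      rfl
    · rw [hBfw, if_neg hcase]
      unfold cellA
      rw [hAfs, if_neg hcase]
      exact ih

-- the whole row
theorem row_eq (risks svars : List (List (String × String))) (fname : String)
    (hmem : fname ∈ svars.map (fun sv => rget sv "name" "")) :
    (risks.reverse.foldl heatStep
        (svars.foldl (fun d sv => d.insert (rget sv "name" "") (List.replicate heatCols.length "—"))
          PySem.Dict.empty)).getD fname []
      = heatCols.map (fun col =>
          let s := firstSeverity (risks.filter (fun r => rget r "field_name" "" == fname)) col
          if s == "" then "—" else s) := by
  rw [List.foldl_reverse]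
  have hbase : (svars.foldl
      (fun d sv => d.insert (rget sv "name" "") (List.replicate heatCols.length "—"))
        PySem.Dict.empty).getD fname [] = List.replicate heatCols.length "—" := by
    rw [getD_cells0, if_pos hmem]
  have hcont : (svars.foldl
      (fun d sv => d.insert (rget sv "name" "") (List.replicate heatCols.length "—"))
        PySem.Dict.empty).contains fname = true := by
    rw [contains_cells0]
    simp [hmem]
  have hlen : ((svars.foldl
      (fun d sv => d.insert (rget sv "name" "") (List.replicate heatCols.length "—"))
        PySem.Dict.empty).getD fname []).length = 7 := by
    rw [hbase]; rfl
  apply List.ext_getElem?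
  intro i
  rw [fold_cell risks _ fname i hcont hlen, List.getElem?_map, hbase]
  by_cases hi : i < 7
  · have hilt : i < heatCols.length := by simpa [heatCols] using hi
    have hcol : heatCols[i]? = some heatCols[i] := List.getElem?_eq_getElem hilt
    rw [hcol]
    have hcc := cell_corr risks fname heatCols[i] i hcol
    have hrep : (List.replicate heatCols.length "—")[i]? = some "—" :=
      List.getElem?_replicate_of_lt (by simpa [heatCols] using hi)
    cases hfw : firstWrite risks fname i with
    | some v =>
      rw [hfw] at hcc
      have hv : v = cellA risks fname heatCols[i] := hcc
      show some v = some (cellA risks fname heatCols[i])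
      rw [hv]
    | none =>
      rw [hfw] at hcc
      have hv : "—" = cellA risks fname heatCols[i] := hcc
      rw [hrep]
      show some "—" = some (cellA risks fname heatCols[i])
      rw [hv]
  · rw [firstWrite_none_of_ge risks fname i (by omega)]
    rw [List.getElem?_eq_none (by simp [heatCols]; omega),
        List.getElem?_eq_none (by simp [heatCols]; omega)]
    rfl

-- ===== VERDICT (by name: the statement is the Claim_ definition above) =====
theorem generate_heatmap_spec : Claim_equal_generate_heatmap := by
  intro target _
  show generate_heatmap target = generate_heatmap_alt target
  unfold generate_heatmap generate_heatmap_alt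
  set svars := ((PySem.Dict.mk target).get? "state_variables").getD []
  set risks := ((PySem.Dict.mk target).get? "encapsulation_risks").getD []
  by_cases h : (svars.isEmpty || risks.isEmpty) = true
  · rw [if_pos h, if_pos h]
  · rw [if_neg h, if_neg h]
    refine congrArg (PySem.Str.join "\n") ?_
    rw [PySem.List.foldl_append_singleton_eq_map, PySem.List.foldl_append_singleton_eq_map]
    have hsep : heatCols.map (fun _ => "---") = List.replicate heatCols.length "---" := by decide
    rw [hsep]
    simp only [List.cons_append, List.nil_append]
    refine congrArg (List.cons _) (congrArg (List.cons _) ?_)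
    rw [List.append_cancel_right_eq]
    refine List.map_congr_left fun sv hsv => ?_
    have hmem : rget sv "name" "" ∈ svars.map (fun sv => rget sv "name" "") :=
      List.mem_map_of_mem hsv
    simp only [matched_eq_filter]
    rw [row_eq risks svars _ hmem]
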